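-- pv_equiv track=rewrite | github.com/CraigNielsen/subsetSum | test_problem.py | findFirstMatchingPair
-- ===== SOURCE A (Python) =====
-- def findFirstMatchingPair(llist, degree):
--     pair = []
--     for i in range(len(llist)):
--         for j in range(1, len(llist[i:]) ):
--             if ((llist[i]+llist[i+j])%degree == 0):
--                 pair.append(llist[i])
--                 pair.append(llist[i+j])
--                 return pair
--     return []
-- ===== SOURCE B (Python) =====
-- def findFirstMatchingPair(llist, degree):
--     # One backward pass: nxt maps residue -> value at the smallest later index
--     # with that residue; best is overwritten as we move left, so the leftmost
--     # i (with its smallest partner index) wins, matching the nested-loop order.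
--     nxt = {}
--     best = None
--     for v in reversed(llist):
--         w = nxt.get((-v) % degree)
--         if w is not None:
--             best = (v, w)
--         nxt[v % degree] = v
--     return [best[0], best[1]] if best is not None else []
-- ===== Notes on version B (the rewrite author's own statement) =====
-- stated objective: faster
-- what changed: A's O(n^2) nested index loops are replaced by a single backward pass keeping a dict from residue class mod degree to the value at the smallest later index, so the first i with a partner (and its first partner) falls out in O(n).
-- outside the precondition, e.g. on findFirstMatchingPair([5], 0): A returns [], B raises ZeroDivisionError
import Mathlib
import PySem

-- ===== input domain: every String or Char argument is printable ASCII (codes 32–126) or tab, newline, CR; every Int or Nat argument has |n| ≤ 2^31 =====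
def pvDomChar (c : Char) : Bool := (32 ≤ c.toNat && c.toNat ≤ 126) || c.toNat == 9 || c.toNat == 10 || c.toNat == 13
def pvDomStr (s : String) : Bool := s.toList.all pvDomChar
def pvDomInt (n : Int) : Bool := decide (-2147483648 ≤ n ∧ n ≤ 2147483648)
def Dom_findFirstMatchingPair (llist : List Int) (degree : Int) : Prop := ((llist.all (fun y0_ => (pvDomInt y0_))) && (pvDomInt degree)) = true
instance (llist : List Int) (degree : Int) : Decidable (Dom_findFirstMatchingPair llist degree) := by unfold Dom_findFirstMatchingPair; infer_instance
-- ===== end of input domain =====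

-- B replaces A's quadratic nested index loops by one backward pass that keeps,
-- per residue class mod degree, the value at the smallest later index (objective: faster).

-- ===== PORT A =====
-- llist[i] / llist[i+j]: the loop bounds keep both indices in range, so the default 0 is never used (exact)
def pvGetA (llist : List Int) (i : Int) : Int := PySem.List.pyGetD llist i 0

-- inner loop 'for j in range(1, len(llist[i:]))', early return as Option
def pvInnerA (llist : List Int) (degree : Int) (i : Int) : List Int → Option (List Int)
  | [] => none
  | j :: js =>
      if PySem.Int.mod (pvGetA llist i + pvGetA llist (i + j)) degree == 0 then
        some [pvGetA llist i, pvGetA llist (i + j)]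
      else pvInnerA llist degree i js

-- outer loop 'for i in range(len(llist))'
def pvOuterA (llist : List Int) (degree : Int) : List Int → List Int
  | [] => []
  | i :: is =>
      match pvInnerA llist degree i (PySem.List.pyRange 1 ((llist.length : Int) - i) 1) with
      | some p => p
      | none => pvOuterA llist degree is

def findFirstMatchingPair (llist : List Int) (degree : Int) : List Int :=
  pvOuterA llist degree (PySem.List.pyRange 0 (llist.length : Int) 1)

-- ===== PORT B =====
-- one step of B's backward pass: st = (nxt, best)
def pvStepB (degree : Int) (st : PySem.Dict Int Int × Option (Int × Int)) (v : Int) :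
    PySem.Dict Int Int × Option (Int × Int) :=
  let best :=
    match st.1.get? (PySem.Int.mod (-v) degree) with
    | some w => some (v, w)
    | none => st.2
  (st.1.insert (PySem.Int.mod v degree) v, best)

def findFirstMatchingPair_alt (llist : List Int) (degree : Int) : List Int :=
  match (llist.reverse.foldl (pvStepB degree) (PySem.Dict.empty, none)).2 with
  | some (a, b) => [a, b]
  | none => []

-- ===== PRECONDITION & SPEC =====
-- Pre_ excludes degree = 0 with a non-empty list: there A raises ZeroDivisionError once the inner
-- loop body runs, except on single-element lists where A returns [] but B's own '% degree' still
-- raises ZeroDivisionError — B raises there too, so those inputs are excluded as well.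
def Pre_findFirstMatchingPair (llist : List Int) (degree : Int) : Prop :=
  degree ≠ 0 ∨ llist = []
instance (llist : List Int) (degree : Int) : Decidable (Pre_findFirstMatchingPair llist degree) := by unfold Pre_findFirstMatchingPair; infer_instance
def pvWitness_findFirstMatchingPair : List Int × Int := ([3, 1, 4, 1, 5], 2)

def Spec_findFirstMatchingPair (llist : List Int) (degree : Int) (out : List Int) : Prop := out = findFirstMatchingPair_alt llist degree
instance (llist : List Int) (degree : Int) (out : List Int) : Decidable (Spec_findFirstMatchingPair llist degree out) := by unfold Spec_findFirstMatchingPair; infer_instance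

-- ===== CLAIM (what is proved, stated in full; the proofs are below) =====
def Claim_equal_findFirstMatchingPair : Prop := ∀ (llist : List Int) (degree : Int), Dom_findFirstMatchingPair llist degree → Pre_findFirstMatchingPair llist degree → Spec_findFirstMatchingPair llist degree (findFirstMatchingPair llist degree)

-- ===== LEMMAS AND PROOFS =====

-- common characterisation of both programs: first x (in order) that has a later partner,
-- paired with its first partner
def pvSpec (degree : Int) : List Int → List Int
  | [] => []
  | x :: xs =>
      match xs.find? (fun y => PySem.Int.mod (x + y) degree == 0) with
      | some y => [x, y]
      | none => pvSpec degree xs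

def pvRender : Option (Int × Int) → List Int
  | some (a, b) => [a, b]
  | none => []

-- Python '%' congruence: two ints have the same residue iff degree divides their difference
lemma pv_mod_eq_iff (a b d : Int) (hd : d ≠ 0) :
    PySem.Int.mod a d = PySem.Int.mod b d ↔ d ∣ (b - a) := by
  have hemod : (a % d = b % d) ↔ d ∣ (b - a) := by
    rw [Int.emod_eq_emod_iff_emod_sub_eq_zero, PySem.Int.emod_eq_zero_iff_dvd]
    exact dvd_sub_comm
  have ha := Int.emod_nonneg a hd
  have hb := Int.emod_nonneg b hd
  have ha2 : a % d < |d| := by rw [← Int.emod_abs]; exact Int.emod_lt_of_pos a (abs_pos.mpr hd)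
  have hb2 : b % d < |d| := by rw [← Int.emod_abs]; exact Int.emod_lt_of_pos b (abs_pos.mpr hd)
  rw [show PySem.Int.mod a d = Int.fmod a d from rfl, show PySem.Int.mod b d = Int.fmod b d from rfl,
      Int.fmod_eq_emod, Int.fmod_eq_emod]
  have hda : d ∣ a ↔ a % d = 0 := (PySem.Int.emod_eq_zero_iff_dvd a d).symm
  have hdb : d ∣ b ↔ b % d = 0 := (PySem.Int.emod_eq_zero_iff_dvd b d).symm
  have habs : |d| = d ∨ |d| = -d := abs_choice d
  split_ifs with h1 h2 h2 <;> rw [← hemod] <;> constructor <;> intro h <;> omega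

-- the two find? predicates agree pointwise
lemma pv_pred_eq (x degree : Int) (hd : degree ≠ 0) (y : Int) :
    (PySem.Int.mod y degree == PySem.Int.mod (-x) degree)
      = (PySem.Int.mod (x + y) degree == 0) := by
  rw [Bool.eq_iff_iff]
  simp only [beq_iff_eq]
  rw [pv_mod_eq_iff y (-x) degree hd, PySem.Int.mod_eq_zero_iff_dvd]
  constructor <;> intro h
  · have h2 : degree ∣ -(-x - y) := dvd_neg.mpr h
    have : -(-x - y) = x + y := by ring
    rwa [this] at h2
  · have h2 : degree ∣ -(x + y) := dvd_neg.mpr h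
    have : -(x + y) = -x - y := by ring
    rwa [this] at h2

-- in-range read through pyGetD
lemma pv_getA_nat (llist : List Int) (k : Nat) (hk : k < llist.length) :
    pvGetA llist (k : Int) = llist[k] := by
  simp [pvGetA, PySem.List.pyGetD_natCast, List.getD_eq_getElem?_getD, hk]

-- A-side: the inner loop is find? over the tail after position i+j
lemma pv_innerA_eq (llist : List Int) (degree : Int) (i j : Nat) (hi : i < llist.length)
    (hj : 1 ≤ j) :
    pvInnerA llist degree (i : Int) (PySem.List.pyRange (j : Int) ((llist.length : Int) - (i : Int)) 1)
      = ((llist.drop (i + j)).find? (fun y => PySem.Int.mod (llist[i] + y) degree == 0)).map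
          (fun y => [llist[i], y]) := by
  by_cases hle : llist.length ≤ i + j
  · rw [PySem.List.pyRange_one_eq_nil (by omega)]
    rw [List.drop_eq_nil_of_le hle]
    rfl
  · rw [not_le] at hle
    rw [PySem.List.pyRange_one_cons (by omega)]
    have hij : ((i : Int) + (j : Int)) = ((i + j : Nat) : Int) := by push_cast; ring
    rw [show pvInnerA llist degree (i:Int) ((j:Int) :: PySem.List.pyRange ((j:Int)+1) ((llist.length : Int) - (i:Int)) 1)
        = if PySem.Int.mod (pvGetA llist i + pvGetA llist ((i:Int) + (j:Int))) degree == 0 then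
            some [pvGetA llist i, pvGetA llist ((i:Int) + (j:Int))]
          else pvInnerA llist degree i (PySem.List.pyRange ((j:Int)+1) ((llist.length : Int) - (i:Int)) 1) from rfl]
    rw [hij, pv_getA_nat llist i hi, pv_getA_nat llist (i+j) hle]
    rw [List.drop_eq_getElem_cons hle]
    rw [List.find?_cons]
    by_cases hc : (PySem.Int.mod (llist[i] + llist[i+j]) degree == 0) = true
    · simp only [hc]
      rfl
    · simp only [if_neg hc]
      rw [Bool.not_eq_true] at hc
      rw [hc]
      have hrec := pv_innerA_eq llist degree i (j+1) hi (by omega)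
      rw [show ((j:Int)+1) = ((j+1 : Nat) : Int) by push_cast; ring, hrec]
      rw [show i + (j+1) = i + j + 1 by omega]
  termination_by llist.length - (i + j)
  decreasing_by omega

-- A-side: the outer loop from index i is pvSpec of the i-th tail
lemma pv_outerA_eq (llist : List Int) (degree : Int) :
    ∀ i : Nat, i ≤ llist.length →
      pvOuterA llist degree (PySem.List.pyRange (i : Int) ((llist.length : Int)) 1)
        = pvSpec degree (llist.drop i) := by
  intro i
  induction hn : llist.length - i generalizing i with
  | zero =>
    intro hle
    have : i = llist.length := by omega
    subst this
    rw [PySem.List.pyRange_one_eq_nil (by omega), List.drop_length]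
    rfl
  | succ n ihn =>
    intro hle
    have hi : i < llist.length := by omega
    rw [PySem.List.pyRange_one_cons (by omega)]
    show (match pvInnerA llist degree i (PySem.List.pyRange 1 ((llist.length : Int) - i) 1) with
      | some p => p
      | none => pvOuterA llist degree (PySem.List.pyRange ((i:Int)+1) ((llist.length : Int)) 1)) = _
    have hinner := pv_innerA_eq llist degree i 1 hi (le_refl 1)
    rw [Nat.cast_one] at hinner
    rw [hinner]
    rw [List.drop_eq_getElem_cons hi]
    show _ = pvSpec degree (llist[i] :: llist.drop (i+1))
    unfold pvSpec
    cases h : (llist.drop (i+1)).find? (fun y => PySem.Int.mod (llist[i] + y) degree == 0) with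
    | some y => rfl
    | none =>
      simp only [Option.map_none]
      rw [show ((i:Int)+1) = ((i+1 : Nat) : Int) by push_cast; ring]
      exact ihn (i+1) (by omega) (by omega)

-- B-side: invariant of the backward fold
lemma pv_foldB_inv (degree : Int) (hd : degree ≠ 0) (xs : List Int) :
    (∀ r : Int,
        ((xs.reverse.foldl (pvStepB degree) (PySem.Dict.empty, none)).1).get? r
          = xs.find? (fun v => PySem.Int.mod v degree == r))
    ∧ pvRender ((xs.reverse.foldl (pvStepB degree) (PySem.Dict.empty, none)).2)
        = pvSpec degree xs := by
  induction xs with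
  | nil => exact ⟨fun r => by simp [PySem.Dict.get?, PySem.Dict.empty], rfl⟩
  | cons x t ih =>
    rw [List.reverse_cons, List.foldl_append]
    set st := t.reverse.foldl (pvStepB degree) (PySem.Dict.empty, none) with hst
    obtain ⟨ih1, ih2⟩ := ih
    simp only [List.foldl_cons, List.foldl_nil]
    constructor
    · intro r
      show ((st.1.insert (PySem.Int.mod x degree) x).get? r) = _
      by_cases hr : r = PySem.Int.mod x degree
      · subst hr
        rw [PySem.Dict.get?_insert_self]
        rw [List.find?_cons_of_pos (by simp)]
      · rw [PySem.Dict.get?_insert_of_ne _ _ hr]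
        rw [List.find?_cons_of_neg (by simpa using Ne.symm hr)]
        exact ih1 r
    · show pvRender (match st.1.get? (PySem.Int.mod (-x) degree) with
        | some w => some (x, w) | none => st.2) = pvSpec degree (x :: t)
      rw [ih1]
      have hpred : (fun v => PySem.Int.mod v degree == PySem.Int.mod (-x) degree)
          = (fun y => PySem.Int.mod (x + y) degree == 0) := by
        funext y; exact pv_pred_eq x degree hd y
      rw [hpred]
      show _ = pvSpec degree (x :: t)
      unfold pvSpec
      cases h : t.find? (fun y => PySem.Int.mod (x + y) degree == 0) with
      | some y => rfl
      | none => exact ih2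

-- ===== VERDICT (by name: the statement is the Claim_ definition above) =====
theorem findFirstMatchingPair_spec : Claim_equal_findFirstMatchingPair := by
  intro llist degree _ hpre
  unfold Spec_findFirstMatchingPair
  rcases hpre with hd | hnil
  · have hA : findFirstMatchingPair llist degree = pvSpec degree llist := by
      have := pv_outerA_eq llist degree 0 (Nat.zero_le _)
      simpa [findFirstMatchingPair] using this
    have hB : findFirstMatchingPair_alt llist degree = pvSpec degree llist := by
      have := (pv_foldB_inv degree hd llist).2
      simpa [findFirstMatchingPair_alt, pvRender] using this
    rw [hA, hB]
  · subst hnil; rfl
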